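-- pv_equiv track=rewrite | github.com/rgrindle/y2eq | src/srvgd/data_gathering/rebuild_dataset_2d.py | find_var_x
-- ===== SOURCE A (Python) =====
-- def find_var_x(eq):
--     indices = []
--     for i, token in enumerate(eq):
--         if token == 'x':
--             if 0 < i < len(eq)-1:
--                 if eq[i-1:i+2] != 'exp':
--                     indices.append(i)
--             else:
--                 indices.append(i)
--     return indices
-- ===== SOURCE B (Python) =====
-- def find_var_x(eq):
--     excluded = {i + 1 for i in range(len(eq) - 2) if eq[i:i + 3] == 'exp'}
--     return [i for i, token in enumerate(eq) if token == 'x' and i not in excluded]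
-- ===== Notes on version B (the rewrite author's own statement) =====
-- stated objective: alternative
-- what changed: A decides per-'x' with an inline slice test during one combined scan; B first builds a set of excluded positions (the middle 'x' of every 'exp' occurrence) and then filters the 'x' indices against that set in a second pass.
import Mathlib
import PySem

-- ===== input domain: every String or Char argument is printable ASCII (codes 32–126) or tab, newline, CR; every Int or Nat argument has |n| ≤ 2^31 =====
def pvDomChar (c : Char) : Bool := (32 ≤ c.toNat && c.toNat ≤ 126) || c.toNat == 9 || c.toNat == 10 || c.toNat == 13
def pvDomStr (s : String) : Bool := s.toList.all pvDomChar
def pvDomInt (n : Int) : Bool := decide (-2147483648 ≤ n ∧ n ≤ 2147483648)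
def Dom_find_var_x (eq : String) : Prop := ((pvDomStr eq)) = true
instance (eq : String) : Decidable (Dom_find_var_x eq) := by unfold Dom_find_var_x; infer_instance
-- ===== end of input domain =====

-- B builds an index of excluded 'x' positions (middles of 'exp' matches) first, then filters;
-- objective: alternative decomposition (two-phase build-index-then-filter instead of A's combined scan).

-- ===== PORT A =====
def find_var_x (eq : String) : List Int :=
  (PySem.List.enumerate eq.toList 0).foldl
    (fun indices p =>
      if p.2 = 'x' then
        if 0 < p.1 ∧ p.1 < (eq.toList.length : Int) - 1 then
          if PySem.List.slice eq.toList (some (p.1 - 1)) (some (p.1 + 2)) ≠ ['e','x','p'] then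
            indices ++ [p.1]
          else indices
        else indices ++ [p.1]
      else indices) []

-- ===== PORT B =====
-- Source B's local 'excluded' set: the middle-'x' positions of every 'exp' occurrence
def pvExcluded (l : List Char) : PySem.Set Int :=
  PySem.Set.ofList
    (((PySem.List.pyRange 0 ((l.length : Int) - 2) 1).filter
        (fun j => PySem.List.slice l (some j) (some (j + 3)) = ['e','x','p'])).map
      (· + 1))

def find_var_x_alt (eq : String) : List Int :=
  ((PySem.List.enumerate eq.toList 0).filter
      (fun p => p.2 == 'x' && !((pvExcluded eq.toList).contains p.1))).map (·.1)

-- ===== PRECONDITION & SPEC =====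
def Spec_find_var_x (eq : String) (out : List Int) : Prop := out = find_var_x_alt eq
instance (eq : String) (out : List Int) : Decidable (Spec_find_var_x eq out) := by unfold Spec_find_var_x; infer_instance

-- ===== CLAIM (what is proved, stated in full; the proofs are below) =====
def Claim_equal_find_var_x : Prop := ∀ (eq : String), Dom_find_var_x eq → Spec_find_var_x eq (find_var_x eq)

-- ===== LEMMAS AND PROOFS =====

-- membership in B's exclusion index, characterised on the input string
theorem mem_excluded_iff (l : List Char) (i : Int) :
    (pvExcluded l).contains i = true ↔
    (1 ≤ i ∧ i < (l.length : Int) - 1 ∧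
      PySem.List.slice l (some (i - 1)) (some (i + 2)) = ['e','x','p']) := by
  unfold pvExcluded
  simp only [PySem.Set.contains, List.contains_eq_mem, PySem.Set.mem_ofList, List.mem_map,
    List.mem_filter, PySem.List.mem_pyRange_one, decide_eq_true_eq]
  constructor
  · rintro ⟨j, ⟨⟨hj0, hj2⟩, hs⟩, rfl⟩
    refine ⟨by omega, by omega, ?_⟩
    have h1 : j + 1 - 1 = j := by ring
    have h2 : j + 1 + 2 = j + 3 := by ring
    rw [h1, h2]; exact hs
  · rintro ⟨h1, h2, hs⟩
    refine ⟨i - 1, ⟨⟨by omega, by omega⟩, ?_⟩, by ring⟩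
    have h3 : i - 1 + 3 = i + 2 := by ring
    rw [h3]; exact hs

-- ===== VERDICT (by name: the statement is the Claim_ definition above) =====
theorem find_var_x_spec : Claim_equal_find_var_x := by
  intro eq _
  unfold Spec_find_var_x find_var_x find_var_x_alt
  set l := eq.toList with hl
  have hfun :
      (fun (indices : List Int) (p : Int × Char) =>
        if p.2 = 'x' then
          if 0 < p.1 ∧ p.1 < (l.length : Int) - 1 then
            if PySem.List.slice l (some (p.1 - 1)) (some (p.1 + 2)) ≠ ['e','x','p'] then
              indices ++ [p.1]
            else indices
          else indices ++ [p.1]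
        else indices) =
      (fun (indices : List Int) (p : Int × Char) =>
        if (p.2 = 'x' ∧
            (0 < p.1 ∧ p.1 < (l.length : Int) - 1 →
              PySem.List.slice l (some (p.1 - 1)) (some (p.1 + 2)) ≠ ['e','x','p'])) then
          indices ++ [p.1]
        else indices) := by
    funext indices p
    split_ifs with h1 h2 h3 h4 h5 h6 h7 <;> tauto
  rw [hfun, PySem.List.foldl_append_ite]
  simp only [List.nil_append]
  congr 1
  apply List.filter_congr
  intro p hp
  rw [Bool.eq_iff_iff]
  simp only [decide_eq_true_eq, Bool.and_eq_true, beq_iff_eq, Bool.not_eq_true']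
  constructor
  · rintro ⟨hx, hcond⟩
    refine ⟨hx, ?_⟩
    rw [Bool.eq_false_iff]
    intro hmem
    rw [mem_excluded_iff] at hmem
    obtain ⟨ha, hb, hs⟩ := hmem
    exact hcond ⟨by omega, hb⟩ hs
  · rintro ⟨hx, hnm⟩
    refine ⟨hx, ?_⟩
    intro hmid hs
    have hc : (pvExcluded l).contains p.1 = true := by
      rw [mem_excluded_iff]
      exact ⟨by omega, hmid.2, hs⟩
    rw [hc] at hnm
    cases hnm
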